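-- pv_equiv track=rewrite | github.com/Goyatuzo/python-problems | advent_of_code/2019/day_4/secure_container.py | meets_criteria_two
-- ===== SOURCE A (Python) =====
-- def meets_criteria_two(num):
--     # Cast to string for easier processing
--     num = str(num)
--
--     # Keep track of results
--     adjacent_count = 0
--     adjacent_digits = False
--
--     is_increasing = True
--
--     previous_digit = num[0]
--
--     for digit in num[1:]:
--
--         if adjacent_count == -1:
--             pass
--         elif digit == previous_digit:
--             adjacent_count += 1
--             adjacent_digits = True
--         else:
--             if adjacent_count == 1:
--                 adjacent_count = -1
--             else:
--                 adjacent_count = 0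
--
--         if int(previous_digit) > int(digit):
--             is_increasing = False
--
--         previous_digit = digit
--
--     result = (adjacent_count == -1 or adjacent_count == 1) \
--         and adjacent_digits \
--         and is_increasing
--
--     return result
-- ===== SOURCE B (Python) =====
-- def meets_criteria_two(num):
--     s = str(num)
--     increasing = all(int(s[i]) <= int(s[i + 1]) for i in range(len(s) - 1))
--     has_pair = False
--     i = 0
--     while i < len(s):
--         j = i + 1
--         while j < len(s) and s[j] == s[i]:
--             j += 1
--         if j - i == 2:
--             has_pair = True
--         i = j
--     return increasing and has_pair
-- ===== Notes on version B (the rewrite author's own statement) =====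
-- stated objective: simpler
-- what changed: A threads a stateful sentinel machine (adjacent_count with a -1 'done' marker, adjacent_digits flag, previous_digit) through one loop; B computes the two criteria independently: a pairwise all(int(s[i])<=int(s[i+1])) check and a maximal-run scan that looks for a run of length exactly 2.
import Mathlib
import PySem

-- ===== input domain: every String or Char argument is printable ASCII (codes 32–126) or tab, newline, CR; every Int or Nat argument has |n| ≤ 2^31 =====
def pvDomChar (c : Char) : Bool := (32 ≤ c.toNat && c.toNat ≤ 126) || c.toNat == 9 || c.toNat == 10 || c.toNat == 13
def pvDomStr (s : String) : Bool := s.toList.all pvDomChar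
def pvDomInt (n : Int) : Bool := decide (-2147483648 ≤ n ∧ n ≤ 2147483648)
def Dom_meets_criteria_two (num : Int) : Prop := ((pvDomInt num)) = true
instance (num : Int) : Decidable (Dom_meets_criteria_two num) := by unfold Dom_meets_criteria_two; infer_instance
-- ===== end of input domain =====

-- B replaces A's stateful sentinel machine by two independent checks (pairwise non-decreasing,
-- and a maximal-run scan for a run of length exactly 2) — objective: simpler.

-- int(c) for a one-character string c; the `getD 0` default is reached only where Python's
-- int() raises ValueError, which Pre_ excludes (both Pythons call int() on the same chars).
def pvIntOf (c : Char) : Int := (PySem.Int.ofStr? (String.mk [c])).getD 0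

-- ===== PORT A =====
-- the for-loop of A: state (adjacent_count, adjacent_digits, is_increasing), prev digit
def mc2Loop : List Char → Char → Int → Bool → Bool → Int × Bool × Bool
  | [], _, ac, ad, inc => (ac, ad, inc)
  | d :: rest, prev, ac, ad, inc =>
    let st : Int × Bool :=
      if ac = -1 then (ac, ad)
      else if d = prev then (ac + 1, true)
      else if ac = 1 then (-1, ad) else (0, ad)
    let inc' := if pvIntOf prev > pvIntOf d then false else inc
    mc2Loop rest d st.1 st.2 inc'

def meets_criteria_two (num : Int) : Bool :=
  let s := (PySem.Int.toStr num).toList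
  match s with
  | [] => false  -- Python: IndexError on num[0]; unreachable, str(num) is never empty
  | p :: rest =>
    let r := mc2Loop rest p 0 false true
    (r.1 == -1 || r.1 == 1) && r.2.1 && r.2.2

-- ===== PORT B =====
-- inner while: advance j over the run of characters equal to s[i]
def mc2RunEnd (s : List Char) (i j : Nat) : Nat :=
  if h : j < s.length then
    if s.getD j ' ' = s.getD i ' ' then mc2RunEnd s i (j + 1) else j
  else j
termination_by s.length - j

theorem mc2RunEnd_ge (s : List Char) (i j : Nat) : j ≤ mc2RunEnd s i j := by
  unfold mc2RunEnd
  split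
  · split
    · exact le_trans (Nat.le_succ j) (mc2RunEnd_ge s i (j + 1))
    · exact le_refl j
  · exact le_refl j
termination_by s.length - j

-- outer while: scan maximal runs, record a run of length exactly 2
def mc2HasPair (s : List Char) (i : Nat) : Bool :=
  if h : i < s.length then
    (mc2RunEnd s i (i + 1) - i == 2) || mc2HasPair s (mc2RunEnd s i (i + 1))
  else false
termination_by s.length - i
decreasing_by
  have := mc2RunEnd_ge s i (i + 1)
  omega

def meets_criteria_two_alt (num : Int) : Bool :=
  let s := (PySem.Int.toStr num).toList
  let increasing := (List.range (s.length - 1)).all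
    (fun i => decide (pvIntOf (s.getD i ' ') ≤ pvIntOf (s.getD (i + 1) ' ')))
  let hasPair := mc2HasPair s 0
  increasing && hasPair

-- ===== PRECONDITION & SPEC =====
-- Pre_ excludes num < 0: there str(num) contains '-', and both A and B raise ValueError at int('-').
def Pre_meets_criteria_two (num : Int) : Prop := 0 ≤ num
instance (num : Int) : Decidable (Pre_meets_criteria_two num) := by
  unfold Pre_meets_criteria_two; infer_instance
def pvWitness_meets_criteria_two : Int := 112233

def Spec_meets_criteria_two (num : Int) (out : Bool) : Prop := out = meets_criteria_two_alt num
instance (num : Int) (out : Bool) : Decidable (Spec_meets_criteria_two num out) := by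
  unfold Spec_meets_criteria_two; infer_instance

-- ===== CLAIM (what is proved, stated in full; the proofs are below) =====
def Claim_equal_meets_criteria_two : Prop := ∀ (num : Int), Dom_meets_criteria_two num → Pre_meets_criteria_two num → Spec_meets_criteria_two num (meets_criteria_two num)

-- ===== LEMMAS AND PROOFS =====

-- reference forms used to meet in the middle (arbitrary char lists; no digit facts needed,
-- since both ports compare through the same pvIntOf)
def chainSpec : Char → List Char → Bool
  | _, [] => true
  | p, d :: rest => (!decide (pvIntOf p > pvIntOf d)) && chainSpec d rest

def pairSpec : List Char → Bool
  | [] => false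
  | c :: rest =>
    ((rest.takeWhile (· = c)).length + 1 == 2) || pairSpec (rest.dropWhile (· = c))
termination_by l => l.length
decreasing_by
  simp only [List.length_cons]
  have := List.length_dropWhile_le (· = c) rest
  omega

theorem chainSpec_replicate (k : Nat) (c : Char) (l : List Char) :
    chainSpec c (List.replicate k c ++ l) = chainSpec c l := by
  induction k with
  | zero => rfl
  | succ n ih => simp [List.replicate_succ, chainSpec, ih]

-- A1: once adjacent_count is -1 it stays -1 and adjacent_digits is frozen
theorem mc2Loop_neg1 (l : List Char) (p : Char) (ad inc : Bool) :
    mc2Loop l p (-1) ad inc = (-1, ad, inc && chainSpec p l) := by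
  induction l generalizing p inc with
  | nil => simp [mc2Loop, chainSpec]
  | cons d rest ih =>
    by_cases h : pvIntOf p > pvIntOf d <;> simp [mc2Loop, h, ih, chainSpec]

-- A2: a block of repeated characters adds its length to adjacent_count
theorem mc2Loop_replicate (k : Nat) (l : List Char) (p : Char) (ac : Int) (ad inc : Bool)
    (hac : 0 ≤ ac) :
    mc2Loop (List.replicate k p ++ l) p ac ad inc
      = mc2Loop l p (ac + k) (ad || decide (0 < k)) inc := by
  induction k generalizing ac ad with
  | zero => simp
  | succ n ih =>
    have hne : ¬ (ac = -1) := by omega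
    simp only [List.replicate_succ, List.cons_append, mc2Loop, if_neg hne, eq_self_iff_true,
      if_true, lt_irrefl, if_false]
    rw [ih (ac + 1) true (by omega)]
    have h1 : ac + 1 + (n : Int) = ac + ((n : Int) + 1) := by ring
    rw [Bool.true_or]
    push_cast
    rw [h1]
    have h2 : (decide (0 < n + 1)) = true := by simp
    simp [h2]

theorem takeWhile_eq_replicate (c : Char) (l : List Char) :
    l.takeWhile (· = c) = List.replicate (l.takeWhile (· = c)).length c := by
  rw [List.eq_replicate_iff]
  refine ⟨rfl, fun x hx => ?_⟩
  have := List.mem_takeWhile_imp hx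
  simpa using this

-- main A-side characterisation: the loop's verdict equals pairSpec, its is_increasing equals chainSpec
theorem mc2Loop_main (n : Nat) (rest : List Char) (c : Char) (ad inc : Bool)
    (hn : rest.length ≤ n) :
    (((mc2Loop rest c 0 ad inc).1 == -1 || (mc2Loop rest c 0 ad inc).1 == 1)
        && (mc2Loop rest c 0 ad inc).2.1) = pairSpec (c :: rest)
    ∧ (mc2Loop rest c 0 ad inc).2.2 = (inc && chainSpec c rest) := by
  induction n generalizing rest c ad inc with
  | zero =>
    have : rest = [] := by
      cases rest with
      | nil => rfl
      | cons a b => simp at hn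
    subst this
    simp [mc2Loop, pairSpec, chainSpec]
  | succ m ih =>
    set k := (rest.takeWhile (· = c)).length with hk
    have hdecomp : rest = List.replicate k c ++ rest.dropWhile (· = c) := by
      conv_lhs => rw [← List.takeWhile_append_dropWhile (p := (· = c)) (l := rest)]
      rw [← takeWhile_eq_replicate]
    have hrep : mc2Loop rest c 0 ad inc
        = mc2Loop (rest.dropWhile (· = c)) c (k : Int) (ad || decide (0 < k)) inc := by
      conv_lhs => rw [hdecomp]
      rw [mc2Loop_replicate k _ c 0 _ inc (le_refl 0)]
      simp
    have hchain : chainSpec c rest = chainSpec c (rest.dropWhile (· = c)) := by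
      conv_lhs => rw [hdecomp, chainSpec_replicate]
    have hpair : pairSpec (c :: rest)
        = ((k + 1 == 2) || pairSpec (rest.dropWhile (· = c))) := by
      simp [pairSpec, Nat.add_comm, hk]
    cases hdw : rest.dropWhile (· = c) with
    | nil =>
      rw [hrep, hdw]
      simp only [mc2Loop, hpair, hdw, pairSpec, Bool.or_false]
      constructor
      · have h1 : ((k : Int) == -1) = false := by rw [beq_eq_false_iff_ne]; omega
        rw [h1]
        by_cases h2 : k = 1
        · simp [h2]
        · have h3 : ((k : Int) == 1) = false := by rw [beq_eq_false_iff_ne]; omega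
          have h4 : (k + 1 == 2) = false := by rw [beq_eq_false_iff_ne]; omega
          simp [h3, h4]
      · rw [hchain, hdw]; simp [chainSpec]
    | cons d t =>
      have hdc : ¬ (d = c) := by
        have := List.head?_dropWhile_not (p := (· = c)) (l := rest)
        rw [hdw] at this
        simpa using this
      have hlen : t.length ≤ m := by
        have : rest.length = k + (d :: t).length := by
          conv_lhs => rw [hdecomp, hdw]
          simp
        simp at this; omega
      rw [hrep, hdw]
      simp only [mc2Loop, if_neg hdc]
      by_cases hk1 : (k : Int) = 1
      · have hk1' : k = 1 := by omega
        have hne : ¬ ((k : Int) = -1) := by omega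
        simp only [if_neg hne, if_pos hk1]
        rw [mc2Loop_neg1]
        constructor
        · simp [hpair, hk1']
        · rw [hchain, hdw]
          simp only [chainSpec]
          by_cases h : pvIntOf c > pvIntOf d <;> simp [h, Bool.and_comm, Bool.and_assoc,
            Bool.and_left_comm]
      · have hne : ¬ ((k : Int) = -1) := by omega
        simp only [if_neg hne, if_neg hk1]
        have hk1'' : ¬ (k = 1) := by omega
        obtain ⟨ihp, ihc⟩ := ih t d (ad || decide (0 < k))
          (if pvIntOf c > pvIntOf d then false else inc) hlen
        constructor
        · rw [ihp, hpair]
          have h4 : (k + 1 == 2) = false := by rw [beq_eq_false_iff_ne]; omega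
          rw [hdw, h4, Bool.false_or]
        · rw [ihc, hchain, hdw]
          simp only [chainSpec]
          by_cases h : pvIntOf c > pvIntOf d <;> simp [h, Bool.and_comm, Bool.and_assoc,
            Bool.and_left_comm]

-- B-side: the index scans compute takeWhile/dropWhile of the dropped suffix
theorem mc2RunEnd_eq (s : List Char) (i j : Nat) :
    mc2RunEnd s i j = j + ((s.drop j).takeWhile (· = s.getD i ' ')).length := by
  unfold mc2RunEnd
  split
  · rename_i h
    have hdrop : s.drop j = s.getD j ' ' :: s.drop (j + 1) := by
      rw [List.getD_eq_getElem s ' ' h]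
      exact List.drop_eq_getElem_cons h
    rw [hdrop, List.takeWhile_cons]
    split
    · rename_i he
      have hd : (decide (s.getD j ' ' = s.getD i ' ')) = true := by simpa using he
      rw [hd, mc2RunEnd_eq s i (j + 1)]
      simp only [if_true, List.length_cons]
      omega
    · rename_i he
      have hd : (decide (s.getD j ' ' = s.getD i ' ')) = false := by simpa using he
      rw [hd]
      simp
  · rename_i h
    have hnil : s.drop j = [] := by
      rw [List.drop_eq_nil_iff]
      omega
    simp [hnil]
termination_by s.length - j

theorem dropWhile_eq_drop_takeWhile_length (p : Char → Bool) (l : List Char) :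
    l.dropWhile p = l.drop (l.takeWhile p).length := by
  have h := congrArg (List.drop (l.takeWhile p).length)
    (List.takeWhile_append_dropWhile (p := p) (l := l))
  rw [List.drop_left] at h
  exact h

theorem mc2HasPair_eq (s : List Char) (i : Nat) :
    mc2HasPair s i = pairSpec (s.drop i) := by
  unfold mc2HasPair
  split
  · rename_i h
    have hdrop : s.drop i = s.getD i ' ' :: s.drop (i + 1) := by
      rw [List.getD_eq_getElem s ' ' h]
      exact List.drop_eq_getElem_cons h
    set c := s.getD i ' ' with hc
    set tw := ((s.drop (i + 1)).takeWhile (· = c)).length with htw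
    have hre : mc2RunEnd s i (i + 1) = i + 1 + tw := mc2RunEnd_eq s i (i + 1)
    have hj : s.drop (i + 1 + tw) = (s.drop (i + 1)).dropWhile (· = c) := by
      rw [dropWhile_eq_drop_takeWhile_length ((· = c)) (s.drop (i + 1)), List.drop_drop]
    rw [hre, mc2HasPair_eq s (i + 1 + tw), hj]
    conv_rhs => rw [hdrop]
    simp only [pairSpec, ← htw]
    congr 1
    have h2 : i + 1 + tw - i = tw + 1 := by omega
    rw [h2]
  · rename_i h
    have hnil : s.drop i = [] := by
      rw [List.drop_eq_nil_iff]
      omega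
    simp [hnil, pairSpec]
termination_by s.length - i
decreasing_by
  omega

-- B-side: the range-indexed all equals chainSpec
theorem range_all_succ (n : Nat) (f : Nat → Bool) :
    (List.range (n + 1)).all f = (f 0 && (List.range n).all (fun i => f (i + 1))) := by
  rw [List.range_succ_eq_map]
  simp [List.all_map, Function.comp_def]

theorem incAll_eq_chainSpec (c : Char) (rest : List Char) :
    (List.range ((c :: rest).length - 1)).all
      (fun i => decide (pvIntOf ((c :: rest).getD i ' ') ≤ pvIntOf ((c :: rest).getD (i + 1) ' ')))
      = chainSpec c rest := by
  induction rest generalizing c with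
  | nil => simp [chainSpec]
  | cons d t ih =>
    have hlen : (c :: d :: t).length - 1 = (d :: t).length - 1 + 1 := by simp
    rw [hlen, range_all_succ]
    simp only [List.getD_cons_zero, List.getD_cons_succ, chainSpec]
    rw [← ih d]
    by_cases hcd : pvIntOf c ≤ pvIntOf d
    · simp [hcd, not_lt.mpr hcd]
    · simp [hcd, not_le.mp hcd]

-- ===== VERDICT (by name: the statement is the Claim_ definition above) =====
theorem meets_criteria_two_spec : Claim_equal_meets_criteria_two := by
  intro num _ _
  unfold Spec_meets_criteria_two meets_criteria_two meets_criteria_two_alt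
  cases hs : (PySem.Int.toStr num).toList with
  | nil => simp [hs, mc2HasPair, pairSpec]
  | cons c rest =>
    simp only
    obtain ⟨hp, hc⟩ := mc2Loop_main rest.length rest c false true (le_refl _)
    rw [mc2HasPair_eq, List.drop_zero, incAll_eq_chainSpec, ← hp]
    rw [Bool.true_and] at hc
    rw [← hc]
    exact Bool.and_comm _ _
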